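-- pv_equiv track=rewrite | github.com/robertmonroe/shakespeare-ai | src/libriscribe/agents/outliner.py | _split_into_scene_sections
-- ===== SOURCE A (Python) =====
-- def _split_into_scene_sections(scene_outline_md: str) -> list:
--     """Split the scene outline into sections for each scene."""
--     # First, normalize line endings and clean up the text
--     scene_outline_md = scene_outline_md.replace('\r\n', '\n').replace('\r', '\n')
--     lines = scene_outline_md.split('\n')
--
--     scene_sections = []
--     current_section = []
--     is_in_scene = False
--
--     for line in lines:
--         line = line.strip()
--         if not line:
--             continue
--
--         # Detect new scene headers
--         if "Scene" in line and (":" in line or line.strip().startswith("Scene")):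
--             # If we were already in a scene, save it
--             if is_in_scene and current_section:
--                 scene_sections.append("\n".join(current_section))
--                 current_section = []
--
--             is_in_scene = True
--             current_section.append(line)
--         elif is_in_scene:
--             current_section.append(line)
--
--     # Don't forget to add the last scene
--     if current_section:
--         scene_sections.append("\n".join(current_section))
--
--     return scene_sections
-- ===== SOURCE B (Python) =====
-- def _is_scene_header(line):
--     return "Scene" in line and (":" in line or line.startswith("Scene"))
--
--
-- def _split_into_scene_sections(scene_outline_md: str) -> list:
--     """Split the scene outline into sections for each scene."""
--     md = scene_outline_md.replace('\r\n', '\n').replace('\r', '\n')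
--     cleaned = [l.strip() for l in md.split('\n') if l.strip()]
--     idxs = [i for i, l in enumerate(cleaned) if _is_scene_header(l)]
--     return ["\n".join(cleaned[i:j]) for i, j in zip(idxs, idxs[1:] + [len(cleaned)])]
-- ===== Notes on version B (the rewrite author's own statement) =====
-- stated objective: alternative
-- what changed: Replaces the is_in_scene/current_section accumulator state machine with an index-then-partition decomposition: clean the lines once, collect the header indices, and slice the cleaned lines between consecutive header indices.
import Mathlib
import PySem

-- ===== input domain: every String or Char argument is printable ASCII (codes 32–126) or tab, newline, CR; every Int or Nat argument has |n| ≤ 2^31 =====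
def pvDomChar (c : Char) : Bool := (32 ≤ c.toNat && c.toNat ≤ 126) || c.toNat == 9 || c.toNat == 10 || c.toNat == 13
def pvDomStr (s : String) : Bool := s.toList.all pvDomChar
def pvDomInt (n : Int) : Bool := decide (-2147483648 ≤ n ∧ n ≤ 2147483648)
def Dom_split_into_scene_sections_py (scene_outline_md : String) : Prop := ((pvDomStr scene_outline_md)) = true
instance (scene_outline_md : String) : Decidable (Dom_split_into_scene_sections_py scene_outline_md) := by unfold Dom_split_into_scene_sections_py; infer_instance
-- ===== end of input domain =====

-- B replaces A's is_in_scene/current_section state machine by an index-then-partition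
-- decomposition (clean lines once, collect header indices, slice between consecutive headers);
-- same cost, different structure.

-- ===== PORT A =====
def split_into_scene_sections_py (scene_outline_md : String) : List String :=
  let md := PySem.Str.replace (PySem.Str.replace scene_outline_md "\r\n" "\n") "\r" "\n"
  let lines := (PySem.Str.split? md "\n").getD []
  let st := lines.foldl (fun (st : List String × List String × Bool) line =>
      let line := PySem.Str.strip line
      if line = "" then st
      else
        let (scene_sections, current_section, is_in_scene) := st
        if PySem.Str.isIn "Scene" line &&
             (PySem.Str.isIn ":" line || PySem.Str.startswith (PySem.Str.strip line) "Scene") then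
          let (scene_sections, current_section) :=
            if is_in_scene && !current_section.isEmpty then
              (scene_sections ++ [PySem.Str.join "\n" current_section], ([] : List String))
            else (scene_sections, current_section)
          (scene_sections, current_section ++ [line], true)
        else if is_in_scene then (scene_sections, current_section ++ [line], is_in_scene)
        else (scene_sections, current_section, is_in_scene)) ([], [], false)
  if !st.2.1.isEmpty then st.1 ++ [PySem.Str.join "\n" st.2.1] else st.1

-- ===== PORT B =====
def pvIsSceneHeader (line : String) : Bool :=
  PySem.Str.isIn "Scene" line && (PySem.Str.isIn ":" line || PySem.Str.startswith line "Scene")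

def split_into_scene_sections_py_alt (scene_outline_md : String) : List String :=
  let md := PySem.Str.replace (PySem.Str.replace scene_outline_md "\r\n" "\n") "\r" "\n"
  let cleaned := ((PySem.Str.split? md "\n").getD []).filterMap (fun l =>
      if PySem.Str.strip l = "" then none else some (PySem.Str.strip l))
  let idxs := (PySem.List.enumerate cleaned).filterMap (fun p =>
      if pvIsSceneHeader p.2 then some p.1 else none)
  (idxs.zip (PySem.List.slice idxs (some 1) none ++ [(cleaned.length : Int)])).map
    (fun p => PySem.Str.join "\n" (PySem.List.slice cleaned (some p.1) (some p.2)))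

-- ===== PRECONDITION & SPEC =====
def Spec_split_into_scene_sections_py (scene_outline_md : String) (out : List String) : Prop := out = split_into_scene_sections_py_alt scene_outline_md
instance (scene_outline_md : String) (out : List String) : Decidable (Spec_split_into_scene_sections_py scene_outline_md out) := by unfold Spec_split_into_scene_sections_py; infer_instance

-- ===== CLAIM (what is proved, stated in full; the proofs are below) =====
def Claim_equal_split_into_scene_sections_py : Prop := ∀ (scene_outline_md : String), Dom_split_into_scene_sections_py scene_outline_md → Spec_split_into_scene_sections_py scene_outline_md (split_into_scene_sections_py scene_outline_md)

-- ===== LEMMAS AND PROOFS =====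

-- the not-header predicate on an already-stripped line
def pvNotH (l : String) : Bool := !pvIsSceneHeader l

def pvJoin (cur : List String) : String := PySem.Str.join "\n" cur

-- A's header test as written (with its redundant second strip)
def pvHdrA (line : String) : Bool :=
  PySem.Str.isIn "Scene" line &&
    (PySem.Str.isIn ":" line || PySem.Str.startswith (PySem.Str.strip line) "Scene")

-- A's loop body on a nonempty stripped line, as written
def pvStepA (st : List String × List String × Bool) (line : String) :
    List String × List String × Bool :=
  let (scene_sections, current_section, is_in_scene) := st
  if pvHdrA line then
    let (scene_sections, current_section) :=
      if is_in_scene && !current_section.isEmpty then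
        (scene_sections ++ [PySem.Str.join "\n" current_section], ([] : List String))
      else (scene_sections, current_section)
    (scene_sections, current_section ++ [line], true)
  else if is_in_scene then (scene_sections, current_section ++ [line], is_in_scene)
  else (scene_sections, current_section, is_in_scene)

-- A's loop body with the single-strip header predicate (legal on stripped lines)
def pvStep (st : List String × List String × Bool) (line : String) :
    List String × List String × Bool :=
  let (scene_sections, current_section, is_in_scene) := st
  if pvIsSceneHeader line then
    let (scene_sections, current_section) :=
      if is_in_scene && !current_section.isEmpty then
        (scene_sections ++ [pvJoin current_section], ([] : List String))
      else (scene_sections, current_section)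
    (scene_sections, current_section ++ [line], true)
  else if is_in_scene then (scene_sections, current_section ++ [line], is_in_scene)
  else (scene_sections, current_section, is_in_scene)

def pvFinish (st : List String × List String × Bool) : List String :=
  if !st.2.1.isEmpty then st.1 ++ [pvJoin st.2.1] else st.1

-- common spec: partition into groups starting at headers
def pvGroups : List String → List String
  | [] => []
  | x :: t =>
    pvJoin (x :: t.takeWhile pvNotH) :: pvGroups (t.dropWhile pvNotH)
termination_by xs => xs.length
decreasing_by
  exact Nat.lt_succ_of_le (List.length_dropWhile_le _ _)

-- header positions as Nat indices
def pvHp : List String → List Nat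
  | [] => []
  | x :: t => (if pvIsSceneHeader x then [0] else []) ++ (pvHp t).map (· + 1)

def pvClean (ls : List String) : List String :=
  ls.filterMap (fun l => if PySem.Str.strip l = "" then none else some (PySem.Str.strip l))

def pvSec (xs : List String) (p : Nat × Nat) : String :=
  pvJoin (List.take (p.2 - p.1) (List.drop p.1 xs))

def pvNatB (xs : List String) : List String :=
  (List.zip (pvHp xs) ((pvHp xs).drop 1 ++ [xs.length])).map (pvSec xs)

lemma pv_chars_strip_idem (cs : List Char) :
    PySem.Chars.strip (PySem.Chars.strip cs) = PySem.Chars.strip cs := by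
  simp only [PySem.Chars.strip, PySem.Chars.lstrip, PySem.Chars.rstrip]
  set p := PySem.Chars.isspace
  set a := List.dropWhile p cs with ha
  set b := (List.dropWhile p a.reverse).reverse with hb
  have hlb : List.dropWhile p b = b := by
    rcases eq_or_ne b [] with hbe | hbne
    · simp [hbe]
    · have hpre : b <+: a := by
        rw [← List.reverse_suffix, hb, List.reverse_reverse]
        exact List.dropWhile_suffix p
      have hane : a ≠ [] := by
        rintro h
        exact hbne (List.prefix_nil.mp (h ▸ hpre))
      have hhead : b.head hbne = a.head hane := hpre.head hbne
      have hnp : ¬ p (a.head hane) := by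
        have h1 : 0 < a.length := List.length_pos_iff.mpr hane
        have := List.dropWhile_get_zero_not p cs (by rw [← ha]; exact h1)
        simpa [← ha, List.getElem_zero_eq_head] using this
      rw [List.dropWhile_eq_self_iff]
      intro hl hp0
      apply hnp
      rwa [← hhead, ← List.getElem_zero_eq_head]
  rw [hlb, hb, List.reverse_reverse, List.dropWhile_idempotent]

lemma pv_strip_idem (s : String) :
    PySem.Str.strip (PySem.Str.strip s) = PySem.Str.strip s := by
  apply String.toList_inj.mp
  simp only [PySem.Str.strip, String.toList_ofList]
  exact pv_chars_strip_idem s.toList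

lemma pv_mem_clean (ls : List String) (s : String) (h : s ∈ pvClean ls) :
    PySem.Str.strip s = s := by
  rcases List.mem_filterMap.mp h with ⟨a, -, hfa⟩
  by_cases he : PySem.Str.strip a = ""
  · rw [if_pos he] at hfa
    cases hfa
  · rw [if_neg he] at hfa
    obtain rfl : PySem.Str.strip a = s := Option.some_injective _ hfa
    exact pv_strip_idem a

lemma pv_stepA_eq_step (st : List String × List String × Bool) (s : String)
    (h : PySem.Str.strip s = s) : pvStepA st s = pvStep st s := by
  have : pvHdrA s = pvIsSceneHeader s := by
    simp [pvHdrA, pvIsSceneHeader, h]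
  simp [pvStepA, pvStep, this, pvJoin]

lemma pv_foldl_clean (ls : List String) (init : List String × List String × Bool) :
    ls.foldl (fun st l =>
        let s := PySem.Str.strip l
        if s = "" then st else pvStepA st s) init
      = (pvClean ls).foldl pvStepA init := by
  induction ls generalizing init with
  | nil => simp [pvClean]
  | cons l t ih =>
    by_cases he : PySem.Str.strip l = ""
    · simp only [List.foldl_cons, he, if_pos rfl, pvClean, List.filterMap_cons, ih]
      simp [he, pvClean]
    · simp only [List.foldl_cons, pvClean, List.filterMap_cons, he, if_neg he, ih]
      simp [pvClean]

lemma pvA_eq_fold (md : String) :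
    split_into_scene_sections_py md =
      pvFinish ((pvClean (((PySem.Str.split?
        (PySem.Str.replace (PySem.Str.replace md "\r\n" "\n") "\r" "\n") "\n")).getD [])).foldl pvStep ([], [], false)) := by
  have hfun : (fun (st : List String × List String × Bool) line =>
      let line := PySem.Str.strip line
      if line = "" then st
      else
        let (scene_sections, current_section, is_in_scene) := st
        if PySem.Str.isIn "Scene" line &&
             (PySem.Str.isIn ":" line || PySem.Str.startswith (PySem.Str.strip line) "Scene") then
          let (scene_sections, current_section) :=
            if is_in_scene && !current_section.isEmpty then
              (scene_sections ++ [PySem.Str.join "\n" current_section], ([] : List String))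
            else (scene_sections, current_section)
          (scene_sections, current_section ++ [line], true)
        else if is_in_scene then (scene_sections, current_section ++ [line], is_in_scene)
        else (scene_sections, current_section, is_in_scene))
      = (fun st l =>
          let s := PySem.Str.strip l
          if s = "" then st else pvStepA st s) := by
    funext st l
    simp only [pvStepA, pvHdrA, pvJoin]
  unfold split_into_scene_sections_py
  simp only [hfun]
  rw [pv_foldl_clean,
    PySem.List.foldl_congr_mem _ _ _ _
      (fun acc x hx => pv_stepA_eq_step acc x (pv_mem_clean _ x hx))]
  simp [pvFinish, pvJoin]

lemma pv_fold_in (xs : List String) (secs cur : List String) (hcur : cur ≠ []) :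
    pvFinish (xs.foldl pvStep (secs, cur, true)) =
      secs ++ (pvJoin (cur ++ xs.takeWhile pvNotH) :: pvGroups (xs.dropWhile pvNotH)) := by
  induction xs generalizing secs cur with
  | nil => simp [pvFinish, pvGroups, List.isEmpty_eq_false_iff, hcur]
  | cons x t ih =>
    rw [List.foldl_cons]
    by_cases hx : pvIsSceneHeader x = true
    · have hstep : pvStep (secs, cur, true) x
          = (secs ++ [pvJoin cur], [x], true) := by
        simp [pvStep, hx, List.isEmpty_eq_false_iff, hcur]
      rw [hstep, ih _ _ (by simp)]
      have hnx : pvNotH x = false := by simp [pvNotH, hx]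
      simp [List.takeWhile_cons, List.dropWhile_cons, hnx, pvGroups]
    · have hnx : pvNotH x = true := by simp [pvNotH, hx]
      have hstep : pvStep (secs, cur, true) x = (secs, cur ++ [x], true) := by
        simp [pvStep, hx]
      rw [hstep, ih _ _ (by simp)]
      simp [List.takeWhile_cons, List.dropWhile_cons, hnx]

lemma pv_fold_out (xs : List String) :
    pvFinish (xs.foldl pvStep ([], [], false)) = pvGroups (xs.dropWhile pvNotH) := by
  induction xs with
  | nil => simp [pvFinish, pvGroups]
  | cons x t ih =>
    rw [List.foldl_cons]
    by_cases hx : pvIsSceneHeader x = true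
    · have hstep : pvStep ([], [], false) x = ([], [x], true) := by
        simp [pvStep, hx]
      rw [hstep, pv_fold_in t [] [x] (by simp)]
      have hnx : pvNotH x = false := by simp [pvNotH, hx]
      simp [List.dropWhile_cons, hnx, pvGroups]
    · have hstep : pvStep ([], [], false) x = ([], [], false) := by
        simp [pvStep, hx]
      rw [hstep, ih]
      have hnx : pvNotH x = true := by simp [pvNotH, hx]
      simp [List.dropWhile_cons, hnx]

lemma pv_enum_filterMap (xs : List String) (s : Int) :
    (PySem.List.enumerate xs s).filterMap (fun p => if pvIsSceneHeader p.2 then some p.1 else none)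
      = (pvHp xs).map (fun n : Nat => s + (n : Int)) := by
  induction xs generalizing s with
  | nil => simp [PySem.List.enumerate, pvHp]
  | cons x t ih =>
    have hmap : ((pvHp t).map (· + 1)).map (fun n : Nat => s + (n : Int))
        = (pvHp t).map (fun n : Nat => (s + 1) + (n : Int)) := by
      rw [List.map_map]; apply List.map_congr_left; intro n _
      simp only [Function.comp_apply]; push_cast; ring
    rw [PySem.List.enumerate_cons, List.filterMap_cons]
    by_cases hx : pvIsSceneHeader x = true
    · simp [hx, ih, pvHp, hmap]
    · simp only [Bool.not_eq_true] at hx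
      simp [hx, ih, pvHp, hmap]

lemma pvB_gen (L : List String) :
    let idxs := (PySem.List.enumerate L).filterMap (fun p =>
        if pvIsSceneHeader p.2 then some p.1 else none)
    (idxs.zip (PySem.List.slice idxs (some 1) none ++ [(L.length : Int)])).map
        (fun p => PySem.Str.join "\n" (PySem.List.slice L (some p.1) (some p.2)))
      = pvNatB L := by
  simp only
  rw [pv_enum_filterMap L 0]
  have h0 : (pvHp L).map (fun n : Nat => (0 : Int) + (n : Int))
      = (pvHp L).map (fun n : Nat => (n : Int)) := by
    apply List.map_congr_left; intro n _; ring
  rw [h0]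
  rw [PySem.List.slice_from _ (by norm_num : (0:Int) ≤ 1)]
  have h1 : List.drop (1 : Int).toNat ((pvHp L).map (fun n : Nat => (n : Int)))
      ++ [(L.length : Int)]
      = ((pvHp L).drop 1 ++ [L.length]).map (fun n : Nat => (n : Int)) := by
    simp [← List.map_drop]
  rw [h1, List.zip_map, List.map_map]
  apply List.map_congr_left
  rintro ⟨i, j⟩ _
  simp only [Function.comp_apply, Prod.map_apply]
  rw [PySem.List.slice_natCast]
  rfl

lemma pvB_eq_natB (md : String) :
    split_into_scene_sections_py_alt md =
      pvNatB (pvClean (((PySem.Str.split?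
        (PySem.Str.replace (PySem.Str.replace md "\r\n" "\n") "\r" "\n") "\n")).getD [])) := by
  exact pvB_gen _

lemma pv_hp_nil (t : List String) (h : pvHp t = []) :
    t.takeWhile pvNotH = t ∧ t.dropWhile pvNotH = [] := by
  induction t with
  | nil => simp
  | cons y t ih =>
    simp only [pvHp] at h
    rcases List.append_eq_nil_iff.mp h with ⟨h1, h2⟩
    have hy : pvIsSceneHeader y = false := by
      by_contra hc
      simp [eq_true_of_ne_false (fun hf => hc hf)] at h1
    have := ih (by simpa using h2)
    simp [List.dropWhile_cons, pvNotH, hy, this.1, this.2]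

lemma pv_hp_head (t : List String) (i0 : Nat) (is' : List Nat) (h : pvHp t = i0 :: is') :
    t.takeWhile pvNotH = t.take i0 ∧ t.dropWhile pvNotH = t.drop i0 := by
  induction t generalizing i0 is' with
  | nil => simp [pvHp] at h
  | cons y t ih =>
    simp only [pvHp] at h
    by_cases hy : pvIsSceneHeader y = true
    · simp [hy] at h
      obtain ⟨h0, -⟩ := h
      subst h0
      simp [List.dropWhile_cons, pvNotH, hy]
    · simp [hy] at h
      rcases List.map_eq_cons_iff.mp h with ⟨j0, js, hhp, hj0, -⟩
      obtain ⟨ht, hd⟩ := ih j0 js hhp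
      simp [List.dropWhile_cons, pvNotH, hy, ← hj0, ht, hd]

lemma pv_shift (x : String) (t : List String) (is : List Nat) :
    (List.zip (is.map (· + 1)) ((is.map (· + 1)).drop 1 ++ [t.length + 1])).map (pvSec (x :: t))
      = (List.zip is (is.drop 1 ++ [t.length])).map (pvSec t) := by
  have h2 : (is.map (· + 1)).drop 1 ++ [t.length + 1]
      = (is.drop 1 ++ [t.length]).map (· + 1) := by
    simp [← List.map_drop]
  rw [h2, List.zip_map, List.map_map]
  apply List.map_congr_left
  rintro ⟨i, j⟩ _
  simp [pvSec, Nat.succ_sub_succ]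

lemma pv_natB_eq_groups (xs : List String) :
    pvNatB xs = pvGroups (xs.dropWhile pvNotH) := by
  induction xs with
  | nil => simp [pvNatB, pvHp, pvGroups]
  | cons x t ih =>
    by_cases hx : pvIsSceneHeader x = true
    · have hnx : pvNotH x = false := by simp [pvNotH, hx]
      rw [List.dropWhile_cons, hnx]
      simp only [Bool.false_eq_true, if_false]
      rcases his : pvHp t with _ | ⟨i0, is'⟩
      · obtain ⟨ht, hd⟩ := pv_hp_nil t his
        simp [pvNatB, pvHp, hx, his, pvGroups, ht, hd, pvSec, pvJoin]
      · obtain ⟨ht, hd⟩ := pv_hp_head t i0 is' his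
        have hhp : pvHp (x :: t) = 0 :: (pvHp t).map (· + 1) := by simp [pvHp, hx]
        have hzip : List.zip (0 :: (pvHp t).map (· + 1))
              (((0 : Nat) :: (pvHp t).map (· + 1)).drop 1 ++ [(x :: t).length])
            = (0, i0 + 1) :: List.zip ((pvHp t).map (· + 1))
                (((pvHp t).map (· + 1)).drop 1 ++ [t.length + 1]) := by
          simp [his, List.zip_cons_cons]
        rw [pvNatB, hhp, hzip, List.map_cons, pv_shift, ← pvNatB, ih]
        rw [pvGroups]
        congr 1
        simp [pvSec, ht, pvJoin, List.take_cons]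
    · have hnx : pvNotH x = true := by simp [pvNotH, hx]
      rw [List.dropWhile_cons, hnx]
      simp only [if_true]
      rw [← ih, pvNatB, pvNatB]
      have hhp : pvHp (x :: t) = (pvHp t).map (· + 1) := by simp [pvHp, hx]
      rw [hhp]
      have hlen : (x :: t).length = t.length + 1 := by simp
      rw [hlen, pv_shift]

-- ===== VERDICT (by name: the statement is the Claim_ definition above) =====
theorem split_into_scene_sections_py_spec : Claim_equal_split_into_scene_sections_py := by
  intro md _
  show _ = _
  rw [pvA_eq_fold, pvB_eq_natB, pv_fold_out, pv_natB_eq_groups]
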